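-- pv_equiv track=rewrite | github.com/mushu-dev/cryoprotect | tests/unit/test_batch_utils_bulk_insert.py | bulk_insert_properties
-- ===== SOURCE A (Python) =====
-- def bulk_insert_properties(property_records, batch_size=1000):
--     """
--     Insert multiple property records in optimized batches.
--
--     This is a simplified version of the function for testing purposes.
--     """
--     if not property_records:
--         return 0
--
--     # Group by property type for more efficient inserts
--     grouped_properties = {}
--     for record in property_records:
--         prop_type = record.get('property_type_id')
--         if not prop_type:
--             continue
--
--         if prop_type not in grouped_properties:
--             grouped_properties[prop_type] = []
--         grouped_properties[prop_type].append(record)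
--
--     # Insert each property type group in a single transaction
--     total_inserted = 0
--
--     for prop_type, records in grouped_properties.items():
--         # Process in reasonable batch sizes
--         for i in range(0, len(records), batch_size):
--             batch = records[i:i+batch_size]
--             # In a real implementation, this would execute a database query
--             # For testing, we just count the records
--             total_inserted += len(batch)
--
--     return total_inserted
-- ===== SOURCE B (Python) =====
-- def bulk_insert_properties(property_records, batch_size=1000):
--     # Single pass: a record is inserted iff it has a truthy property_type_id;
--     # the grouping and batch slicing in the original never change the count.
--     # batch_size is accepted for signature compatibility but unused.
--     return sum(1 for record in property_records if record.get('property_type_id'))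
-- ===== Notes on version B (the rewrite author's own statement) =====
-- stated objective: simpler
-- what changed: Replaced the group-by-type dict plus per-group batch-slice loops by a single truthiness-filtered counting pass, dropping the dict and slices entirely (batch_size becomes unused).
-- intended difference: For batch_size < 0 with at least one record whose property_type_id is truthy, A returns 0 because range(0, len, negative) is empty, while B returns the count of such records, which is the intended number of inserted records. — e.g. on bulk_insert_properties([[("property_type_id", 1)]], -1): A returns 0, B returns 1
-- outside the precondition, e.g. on bulk_insert_properties([{'property_type_id': 1}], 0): A raises ValueError, B returns 1
import Mathlib
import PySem

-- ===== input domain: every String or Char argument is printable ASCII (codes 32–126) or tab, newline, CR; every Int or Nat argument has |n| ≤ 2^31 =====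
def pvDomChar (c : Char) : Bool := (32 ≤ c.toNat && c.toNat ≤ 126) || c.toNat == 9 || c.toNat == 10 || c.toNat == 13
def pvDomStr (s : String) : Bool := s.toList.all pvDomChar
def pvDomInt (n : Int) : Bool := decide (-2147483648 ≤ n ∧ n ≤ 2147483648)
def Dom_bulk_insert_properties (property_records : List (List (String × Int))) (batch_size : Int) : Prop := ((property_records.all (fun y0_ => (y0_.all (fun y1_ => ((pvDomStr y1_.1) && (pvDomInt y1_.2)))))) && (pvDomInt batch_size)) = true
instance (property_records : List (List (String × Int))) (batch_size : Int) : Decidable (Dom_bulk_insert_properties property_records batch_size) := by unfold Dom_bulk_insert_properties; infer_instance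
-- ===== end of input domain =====

-- B replaces A's group-by-type dict plus per-group batch-slice loops by one truthiness-filtered
-- counting pass (simpler; batch_size becomes unused). Return values only; no mutation involved.

-- ===== PORT A =====
-- record.get('property_type_id') (first-match association-list lookup, as a Python dict read)
def pvGet (record : List (String × Int)) : Option Int :=
  (PySem.Dict.mk record).get? "property_type_id"

-- body of A's grouping loop: skip falsy property_type_id, ensure the key, append the record
def pvAStep (g : PySem.Dict Int (List (List (String × Int)))) (record : List (String × Int)) :
    PySem.Dict Int (List (List (String × Int))) :=
  match pvGet record with
  | none => g
  | some pt =>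
    if pt = 0 then g
    else
      let g2 := if g.contains pt then g else g.insert pt ([] : List (List (String × Int)))
      g2.modify pt [] (fun rs => rs ++ [record])

-- body of A's outer counting loop: sum the lengths of the batch slices of one group
def pvABatch (batch_size : Int) (tot : Int) (pr : Int × List (List (String × Int))) : Int :=
  (PySem.List.pyRange 0 (pr.2.length : Int) batch_size).foldl
    (fun t i => t + ((PySem.List.slice pr.2 (some i) (some (i + batch_size))).length : Int)) tot

def bulk_insert_properties (property_records : List (List (String × Int))) (batch_size : Int) : Int :=
  if property_records = [] then 0
  else
    let grouped := property_records.foldl pvAStep PySem.Dict.empty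
    grouped.items.foldl (pvABatch batch_size) 0

-- ===== PORT B =====
-- Python truthiness of record.get('property_type_id'): None and 0 are falsy
def pvKeep (record : List (String × Int)) : Bool :=
  match pvGet record with
  | some v => v != 0
  | none => false

def bulk_insert_properties_alt (property_records : List (List (String × Int))) (batch_size : Int) : Int :=
  property_records.foldl (fun acc record => if pvKeep record then acc + 1 else acc) 0

-- ===== PRECONDITION & SPEC =====
-- some record has a truthy 'property_type_id' (first-match lookup, like the Python dict)
def pvHasTruthy (property_records : List (List (String × Int))) : Bool :=
  property_records.any (fun r => (List.lookup "property_type_id" r).getD 0 != 0)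

-- Pre_ excludes only batch_size = 0 together with at least one truthy property_type_id:
-- there Python's range(0, len, 0) raises ValueError.
def Pre_bulk_insert_properties (property_records : List (List (String × Int))) (batch_size : Int) : Prop :=
  ¬ (batch_size = 0 ∧ pvHasTruthy property_records = true)
instance (property_records : List (List (String × Int))) (batch_size : Int) : Decidable (Pre_bulk_insert_properties property_records batch_size) := by unfold Pre_bulk_insert_properties; infer_instance

def pvWitness_bulk_insert_properties : (List (List (String × Int))) × Int := ([[("property_type_id", 1)]], 1000)

-- On batch_size < 0 with at least one truthy property_type_id, A returns 0 because
-- range(0, len, negative) is empty, while B returns the count of truthy records,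
-- which is the intended number of inserted records.
def D_bulk_insert_properties (property_records : List (List (String × Int))) (batch_size : Int) : Prop :=
  batch_size < 0 ∧ pvHasTruthy property_records = true
instance (property_records : List (List (String × Int))) (batch_size : Int) : Decidable (D_bulk_insert_properties property_records batch_size) := by unfold D_bulk_insert_properties; infer_instance

def Spec_bulk_insert_properties (property_records : List (List (String × Int))) (batch_size : Int) (out : Int) : Prop := ¬ D_bulk_insert_properties property_records batch_size → out = bulk_insert_properties_alt property_records batch_size
instance (property_records : List (List (String × Int))) (batch_size : Int) (out : Int) : Decidable (Spec_bulk_insert_properties property_records batch_size out) := by unfold Spec_bulk_insert_properties; infer_instance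

def pvDiffWitness_bulk_insert_properties : (List (List (String × Int))) × Int := ([[("property_type_id", 1)]], -1)
def pvDiffWitnessOut_bulk_insert_properties : Int × Int := (0, 1)

-- ===== CLAIM (what is proved, stated in full; the proofs are below) =====
def Claim_unchanged_bulk_insert_properties : Prop := ∀ (property_records : List (List (String × Int))) (batch_size : Int), Dom_bulk_insert_properties property_records batch_size → Pre_bulk_insert_properties property_records batch_size → Spec_bulk_insert_properties property_records batch_size (bulk_insert_properties property_records batch_size)
def Claim_changed_bulk_insert_properties : Prop := Dom_bulk_insert_properties (pvDiffWitness_bulk_insert_properties.1) (pvDiffWitness_bulk_insert_properties.2) ∧ Pre_bulk_insert_properties (pvDiffWitness_bulk_insert_properties.1) (pvDiffWitness_bulk_insert_properties.2) ∧ D_bulk_insert_properties (pvDiffWitness_bulk_insert_properties.1) (pvDiffWitness_bulk_insert_properties.2) ∧ bulk_insert_properties (pvDiffWitness_bulk_insert_properties.1) (pvDiffWitness_bulk_insert_properties.2) = pvDiffWitnessOut_bulk_insert_properties.1 ∧ bulk_insert_properties_alt (pvDiffWitness_bulk_insert_properties.1) (pvDiffWitness_bulk_insert_properties.2) = pvDiffWitnessOut_bulk_insert_properties.2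 ∧ pvDiffWitnessOut_bulk_insert_properties.1 ≠ pvDiffWitnessOut_bulk_insert_properties.2
def Claim_exact_bulk_insert_properties : Prop := ∀ (property_records : List (List (String × Int))) (batch_size : Int), Dom_bulk_insert_properties property_records batch_size → Pre_bulk_insert_properties property_records batch_size → D_bulk_insert_properties property_records batch_size → bulk_insert_properties property_records batch_size ≠ bulk_insert_properties_alt property_records batch_size

-- ===== LEMMAS AND PROOFS =====

lemma pvGet_eq_lookup (r : List (String × Int)) :
    pvGet r = List.lookup "property_type_id" r := by
  induction r with
  | nil => rfl
  | cons p rest ih =>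
    obtain ⟨k, v⟩ := p
    have hrest : (PySem.Dict.mk rest).get? "property_type_id" = List.lookup "property_type_id" rest := ih
    by_cases h : k = "property_type_id"
    · simp [pvGet, PySem.Dict.get?_mk_cons, List.lookup, h]
    · have hb : ("property_type_id" == k) = false := by
        simp [Ne.symm h]
      simp [pvGet, PySem.Dict.get?_mk_cons, List.lookup, h, hb, hrest]

lemma pvKeep_eq (r : List (String × Int)) :
    pvKeep r = ((List.lookup "property_type_id" r).getD 0 != 0) := by
  unfold pvKeep
  rw [pvGet_eq_lookup]
  cases List.lookup "property_type_id" r <;> simp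

-- sum of the group sizes held in the dict
def pvSvals (g : PySem.Dict Int (List (List (String × Int)))) : Int :=
  (g.values.map (fun rs => (rs.length : Int))).sum

lemma pv_sum_map_bump {K : List Int} (a b : Int → Int) (hnd : K.Nodup) {k : Int} (hk : k ∈ K)
    (hab : ∀ j, j ≠ k → a j = b j) (hk2 : a k = b k + 1) :
    (K.map a).sum = (K.map b).sum + 1 := by
  induction K with
  | nil => cases hk
  | cons x K' ih =>
    have hnd1 : x ∉ K' := (List.nodup_cons.mp hnd).1
    have hnd2 : K'.Nodup := (List.nodup_cons.mp hnd).2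
    rcases List.mem_cons.mp hk with heq | hx
    · have hax : a x = b x + 1 := by rw [← heq]; exact hk2
      have hmap : K'.map a = K'.map b :=
        List.map_congr_left (fun j hj => hab j (fun hjk => hnd1 (by rw [← heq, ← hjk]; exact hj)))
      simp only [List.map_cons, List.sum_cons, hmap, hax]; ring
    · have hxk : x ≠ k := fun hxe => hnd1 (hxe ▸ hx)
      simp only [List.map_cons, List.sum_cons, hab x hxk, ih hnd2 hx]; ring

lemma pv_keys_modify_cases (d : PySem.Dict Int (List (List (String × Int)))) (k : Int)
    (f : List (List (String × Int)) → List (List (String × Int))) :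
    (d.modify k [] f).keys = if d.contains k then d.keys else d.keys ++ [k] := by
  rw [PySem.Dict.keys_modify]
  by_cases h : d.contains k
  · rw [if_pos h, PySem.Dict.keys_insert_of_contains _ _ h]
  · rw [if_neg h, PySem.Dict.keys_insert_of_not_contains _ _ (by simpa using h)]

lemma pv_nodup_keys_modify (d : PySem.Dict Int (List (List (String × Int)))) (k : Int)
    (f : List (List (String × Int)) → List (List (String × Int))) (hnd : d.keys.Nodup) :
    (d.modify k [] f).keys.Nodup := by
  rw [pv_keys_modify_cases]
  by_cases h : d.contains k
  · simpa [h] using hnd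
  · have hk : k ∉ d.keys := by
      intro hm; exact h ((PySem.Dict.contains_iff_mem_keys d k).mpr hm)
    simp [h, List.nodup_append, hnd]
    exact fun a ha hak => hk (hak ▸ ha)

lemma pv_Svals_modify (d : PySem.Dict Int (List (List (String × Int)))) (k : Int)
    (r : List (String × Int)) (hnd : d.keys.Nodup) :
    pvSvals (d.modify k [] (fun rs => rs ++ [r])) = pvSvals d + 1 := by
  have hnd' := pv_nodup_keys_modify d k (fun rs => rs ++ [r]) hnd
  unfold pvSvals
  rw [PySem.Dict.values_eq_map_keys _ hnd' ([]), PySem.Dict.values_eq_map_keys _ hnd ([]),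
    List.map_map, List.map_map, pv_keys_modify_cases]
  by_cases hc : d.contains k
  · rw [if_pos hc]
    have hkmem : k ∈ d.keys := (PySem.Dict.contains_iff_mem_keys d k).mp hc
    refine pv_sum_map_bump _ _ hnd hkmem ?_ ?_
    · intro j hj
      simp [Function.comp, PySem.Dict.getD_modify, hj]
    · simp [Function.comp, PySem.Dict.getD_modify]
  · rw [if_neg hc]
    have hk : k ∉ d.keys := fun hm => hc ((PySem.Dict.contains_iff_mem_keys d k).mpr hm)
    rw [List.map_append, List.sum_append]
    have h1 : d.keys.map ((fun rs => ((rs : List (List (String × Int))).length : Int)) ∘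
        (fun j => (d.modify k [] (fun rs => rs ++ [r])).getD j [])) =
        d.keys.map ((fun rs => ((rs : List (List (String × Int))).length : Int)) ∘ (fun j => d.getD j [])) := by
      refine List.map_congr_left (fun j hj => ?_)
      have hjk : j ≠ k := by rintro rfl; exact hk hj
      simp [Function.comp, PySem.Dict.getD_modify, hjk]
    rw [h1]
    have h2 : d.getD k [] = [] := PySem.Dict.getD_of_not_contains d ([] : List (List (String × Int))) (by simpa using hc)
    simp [Function.comp, PySem.Dict.getD_modify, h2]

lemma pv_Svals_insert_nil (d : PySem.Dict Int (List (List (String × Int)))) (k : Int)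
    (hc : d.contains k = false) (hnd : d.keys.Nodup) :
    pvSvals (d.insert k []) = pvSvals d := by
  have hk : k ∉ d.keys := fun hm => by
    rw [(PySem.Dict.contains_iff_mem_keys d k).mpr hm] at hc; cases hc
  have hnd' : (d.insert k ([] : List (List (String × Int)))).keys.Nodup := by
    rw [PySem.Dict.keys_insert_of_not_contains _ _ hc]
    simp [List.nodup_append, hnd]
    exact fun a ha hak => hk (hak ▸ ha)
  unfold pvSvals
  rw [PySem.Dict.values_eq_map_keys _ hnd' ([]), PySem.Dict.values_eq_map_keys _ hnd ([]),
    List.map_map, List.map_map, PySem.Dict.keys_insert_of_not_contains _ _ hc,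
    List.map_append, List.sum_append]
  have h1 : d.keys.map ((fun rs => ((rs : List (List (String × Int))).length : Int)) ∘
      (fun j => (d.insert k ([] : List (List (String × Int)))).getD j [])) =
      d.keys.map ((fun rs => ((rs : List (List (String × Int))).length : Int)) ∘ (fun j => d.getD j [])) := by
    refine List.map_congr_left (fun j hj => ?_)
    have hjk : j ≠ k := by rintro rfl; exact hk hj
    simp [Function.comp, PySem.Dict.getD_insert, hjk]
  rw [h1]
  simp [Function.comp, PySem.Dict.getD_insert]

lemma pv_nodup_keys_insert_nil (d : PySem.Dict Int (List (List (String × Int)))) (k : Int)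
    (hc : d.contains k = false) (hnd : d.keys.Nodup) :
    (d.insert k ([] : List (List (String × Int)))).keys.Nodup := by
  rw [PySem.Dict.keys_insert_of_not_contains _ _ hc]
  have hk : k ∉ d.keys := fun hm => by
    rw [(PySem.Dict.contains_iff_mem_keys d k).mpr hm] at hc; cases hc
  simp [List.nodup_append, hnd]
  exact fun a ha hak => hk (hak ▸ ha)

lemma pvAStep_eq_none (g : PySem.Dict Int (List (List (String × Int)))) (r : List (String × Int))
    (h : pvGet r = none) : pvAStep g r = g := by
  unfold pvAStep; rw [h]

lemma pvAStep_eq_some (g : PySem.Dict Int (List (List (String × Int)))) (r : List (String × Int))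
    (pt : Int) (h : pvGet r = some pt) :
    pvAStep g r = if pt = 0 then g
      else (if g.contains pt then g else g.insert pt []).modify pt [] (fun rs => rs ++ [r]) := by
  unfold pvAStep; rw [h]

lemma pvKeep_none (r : List (String × Int)) (h : pvGet r = none) : pvKeep r = false := by
  unfold pvKeep; rw [h]

lemma pvKeep_some (r : List (String × Int)) (pt : Int) (h : pvGet r = some pt) :
    pvKeep r = (pt != 0) := by
  unfold pvKeep; rw [h]

lemma pvAStep_nodup (g : PySem.Dict Int (List (List (String × Int)))) (r : List (String × Int))
    (hnd : g.keys.Nodup) : (pvAStep g r).keys.Nodup := by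
  cases hget : pvGet r with
  | none => rw [pvAStep_eq_none g r hget]; exact hnd
  | some pt =>
    rw [pvAStep_eq_some g r pt hget]
    by_cases hpt : pt = 0
    · rw [if_pos hpt]; exact hnd
    · rw [if_neg hpt]
      by_cases hc : g.contains pt = true
      · rw [if_pos hc]
        exact pv_nodup_keys_modify _ _ _ hnd
      · have hc' : g.contains pt = false := by simpa using hc
        rw [if_neg hc]
        exact pv_nodup_keys_modify _ _ _ (pv_nodup_keys_insert_nil g pt hc' hnd)

lemma pvAStep_Svals (g : PySem.Dict Int (List (List (String × Int)))) (r : List (String × Int))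
    (hnd : g.keys.Nodup) :
    pvSvals (pvAStep g r) = pvSvals g + (if pvKeep r then 1 else 0) := by
  cases hget : pvGet r with
  | none => rw [pvAStep_eq_none g r hget, pvKeep_none r hget]; simp
  | some pt =>
    rw [pvAStep_eq_some g r pt hget, pvKeep_some r pt hget]
    by_cases hpt : pt = 0
    · simp [hpt]
    · rw [if_neg hpt]
      have hkeep : (pt != 0) = true := by simpa using hpt
      rw [hkeep, if_pos rfl]
      by_cases hc : g.contains pt = true
      · rw [if_pos hc]
        exact pv_Svals_modify g pt r hnd
      · have hc' : g.contains pt = false := by simpa using hc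
        rw [if_neg hc]
        rw [pv_Svals_modify _ pt r (pv_nodup_keys_insert_nil g pt hc' hnd),
          pv_Svals_insert_nil g pt hc' hnd]

lemma pvFold_invariant (l : List (List (String × Int))) :
    ∀ g : PySem.Dict Int (List (List (String × Int))), g.keys.Nodup →
    (l.foldl pvAStep g).keys.Nodup ∧
      pvSvals (l.foldl pvAStep g) = pvSvals g + (l.countP pvKeep : Int) := by
  induction l with
  | nil => intro g hnd; exact ⟨hnd, by simp⟩
  | cons r l' ih =>
    intro g hnd
    have hnd1 := pvAStep_nodup g r hnd
    obtain ⟨h1, h2⟩ := ih (pvAStep g r) hnd1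
    refine ⟨by simpa using h1, ?_⟩
    rw [List.foldl_cons, h2, pvAStep_Svals g r hnd, List.countP_cons]
    by_cases hk : pvKeep r <;> simp [hk] <;> push_cast <;> ring

-- telescoping sum of batch-slice lengths (Nat side)
lemma pv_tele (S N : Nat) : ∀ m : Nat,
    ((List.range m).map (fun k => min (S * (k + 1)) N - min (S * k) N)).sum = min (S * m) N := by
  intro m
  induction m with
  | zero => simp
  | succ m ih =>
    rw [List.range_succ, List.map_append, List.sum_append, ih]
    have h1 : min (S * m) N ≤ min (S * (m + 1)) N :=
      min_le_min (Nat.mul_le_mul_left _ (by omega)) le_rfl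
    simp; omega

lemma pv_inner (bs : Int) (hbs : 1 ≤ bs) (recs : List (List (String × Int))) (t : Int) :
    (PySem.List.pyRange 0 (recs.length : Int) bs).foldl
      (fun t i => t + ((PySem.List.slice recs (some i) (some (i + bs))).length : Int)) t
      = t + recs.length := by
  obtain ⟨S, hS⟩ : ∃ S : Nat, (S : Int) = bs := ⟨bs.toNat, by omega⟩
  have hSpos : 0 < S := by omega
  set N := recs.length with hN
  rw [PySem.List.pyRange_of_pos 0 (N : Int) (show (0:Int) < bs by omega), List.foldl_map,
    PySem.List.foldl_add]
  have hterm : ∀ k : Nat,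
      ((PySem.List.slice recs (some ((0 : Int) + bs * (k : Int))) (some ((0 : Int) + bs * (k : Int) + bs))).length : Int)
      = ((min (S * (k + 1)) N - min (S * k) N : Nat) : Int) := by
    intro k
    have e1 : ((0 : Int) + bs * (k : Int)) = ((S * k : Nat) : Int) := by push_cast [← hS]; ring
    have e2 : ((0 : Int) + bs * (k : Int) + bs) = ((S * (k + 1) : Nat) : Int) := by push_cast [← hS]; ring
    rw [e2, e1, PySem.List.length_slice, PySem.List.clampIdx_natCast, PySem.List.clampIdx_natCast]
  rw [List.map_congr_left (fun k _ => hterm k),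
    show (fun k : Nat => ((min (S * (k + 1)) N - min (S * k) N : Nat) : Int)) =
      (Nat.cast : Nat → Int) ∘ (fun k : Nat => min (S * (k + 1)) N - min (S * k) N) from rfl,
    ← List.map_map, ← Nat.cast_list_sum, pv_tele S N]
  congr 1
  by_cases hN0 : (0 : Int) < (N : Int)
  · rw [if_pos hN0]
    have hcast : ((N : Int) - 0 + bs - 1) = ((N + S - 1 : Nat) : Int) := by
      rw [Nat.cast_sub (by omega)]; push_cast [← hS]; ring
    rw [hcast, ← hS, ← Int.natCast_div, Int.toNat_natCast]
    have hdm := Nat.div_add_mod (N + S - 1) S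
    have hmod := Nat.mod_lt (N + S - 1) hSpos
    have hle : N ≤ S * ((N + S - 1) / S) := by omega
    exact congrArg Nat.cast (Nat.min_eq_right hle)
  · rw [if_neg hN0]
    have h0 : N = 0 := by omega
    simp [h0]

lemma pv_outer (bs : Int) (hbs : 1 ≤ bs) (g : PySem.Dict Int (List (List (String × Int)))) :
    g.items.foldl (pvABatch bs) 0 = pvSvals g := by
  have hcongr : ∀ (tot : Int), ∀ pr ∈ g.items, pvABatch bs tot pr = tot + ((pr.2.length : Int)) :=
    fun tot pr _ => pv_inner bs hbs pr.2 tot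
  rw [PySem.List.foldl_congr_mem _ _ _ _ hcongr, PySem.List.foldl_add]
  unfold pvSvals
  rw [show g.values = g.items.map (fun pr => pr.2) from rfl, List.map_map]
  simp [Function.comp_def]

lemma pv_alt_eq_countP (l : List (List (String × Int))) (bs : Int) :
    bulk_insert_properties_alt l bs = (l.countP pvKeep : Int) := by
  unfold bulk_insert_properties_alt
  rw [PySem.List.foldl_count_if pvKeep l 0, zero_add]

lemma pv_truthy_iff (l : List (List (String × Int))) :
    pvHasTruthy l = true ↔ ∃ r ∈ l, pvKeep r = true := by
  unfold pvHasTruthy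
  rw [List.any_eq_true]
  constructor <;> rintro ⟨r, hr, h⟩ <;> exact ⟨r, hr, by rw [pvKeep_eq] at *; exact h⟩

lemma pv_fold_skip (l : List (List (String × Int))) (hall : ∀ r ∈ l, pvKeep r = false) :
    ∀ g, l.foldl pvAStep g = g := by
  induction l with
  | nil => intro g; rfl
  | cons r l' ih =>
    intro g
    have hstep : pvAStep g r = g := by
      have hk := hall r (by simp)
      cases hget : pvGet r with
      | none => exact pvAStep_eq_none g r hget
      | some pt =>
        rw [pvKeep_some r pt hget] at hk
        have hpt : pt = 0 := by simpa using hk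
        rw [pvAStep_eq_some g r pt hget, if_pos hpt]
    rw [List.foldl_cons, hstep]
    exact ih (fun r hr => hall r (by simp [hr])) g

lemma pv_pyRange_neg (b bs : Int) (hb : 0 ≤ b) (hbs : bs < 0) :
    PySem.List.pyRange 0 b bs = [] := by
  unfold PySem.List.pyRange
  rw [if_neg (by omega)]
  rw [if_neg (by omega), if_neg (by omega)]
  simp

lemma pv_Svals_empty : pvSvals (PySem.Dict.empty : PySem.Dict Int (List (List (String × Int)))) = 0 := by
  rfl

-- ===== VERDICT (by name: the statement is the Claim_ definition above) =====
theorem bulk_insert_properties_spec : Claim_unchanged_bulk_insert_properties := by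
  intro l bs _ hpre
  unfold Spec_bulk_insert_properties
  intro hnd
  rw [pv_alt_eq_countP]
  unfold bulk_insert_properties
  by_cases hl : l = []
  · subst hl; simp
  · rw [if_neg hl]
    by_cases hbs : 1 ≤ bs
    · obtain ⟨_, h2⟩ := pvFold_invariant l PySem.Dict.empty (by simp [PySem.Dict.keys_empty])
      rw [pv_outer bs hbs, h2, pv_Svals_empty, zero_add]
    · have hall : ∀ r ∈ l, pvKeep r = false := by
        by_contra hcon
        push_neg at hcon
        obtain ⟨r, hr, hkr⟩ := hcon
        have htr : pvHasTruthy l = true := (pv_truthy_iff l).mpr ⟨r, hr, by simpa using hkr⟩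
        unfold Pre_bulk_insert_properties at hpre
        unfold D_bulk_insert_properties at hnd
        by_cases h0 : bs = 0
        · exact hpre ⟨h0, htr⟩
        · exact hnd ⟨by omega, htr⟩
      rw [pv_fold_skip l hall]
      have : l.countP pvKeep = 0 := List.countP_eq_zero.mpr (fun r hr => by simp [hall r hr])
      simp [this, PySem.Dict.items]
      rfl

theorem bulk_insert_properties_changed : Claim_changed_bulk_insert_properties := by
  unfold Claim_changed_bulk_insert_properties; decide

theorem bulk_insert_properties_tight : Claim_exact_bulk_insert_properties := by
  intro l bs _ _ hd
  unfold D_bulk_insert_properties at hd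
  obtain ⟨hbs, htr⟩ := hd
  obtain ⟨r, hr, hkr⟩ := (pv_truthy_iff l).mp htr
  have hl : l ≠ [] := by rintro rfl; cases hr
  have hA : bulk_insert_properties l bs = 0 := by
    unfold bulk_insert_properties
    rw [if_neg hl]
    have hbatch : ∀ (tot : Int), ∀ pr ∈ (l.foldl pvAStep PySem.Dict.empty).items,
        pvABatch bs tot pr = tot := by
      intro tot pr _
      unfold pvABatch
      rw [pv_pyRange_neg _ _ (by positivity) hbs]
      rfl
    rw [PySem.List.foldl_congr_mem _ _ (fun tot _ => tot) _ hbatch]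
    exact List.foldl_fixed _
  have hB : 0 < l.countP pvKeep := (List.countP_pos_iff).mpr ⟨r, hr, hkr⟩
  rw [hA, pv_alt_eq_countP]
  intro hcontra
  omega
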